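-- pv_equiv track=rewrite | github.com/MrBrantCode/unitest_baseline | mut_generate/mist_train_cf/cf_51006/solution.py | reverse_even
-- ===== SOURCE A (Python) =====
-- def reverse_even(s: str) -> str:
--     if len(s) < 2:
--         return s
--
--     even_chars = []
--     odd_chars = []
--
--     for i in range(len(s)):
--         if i % 2 == 0:
--             even_chars.append(s[i])
--         else:
--             odd_chars.append(s[i])
--
--     even_chars.reverse()
--
--     result = []
--     for e, o in zip(even_chars, odd_chars):
--         result.append(e)
--         result.append(o)
--
--     if len(even_chars) > len(odd_chars):
--         result.append(even_chars[-1])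
--     elif len(odd_chars) > len(even_chars):
--         result.append(odd_chars[-1])
--
--     return ''.join(result)
-- ===== SOURCE B (Python) =====
-- def reverse_even(s: str) -> str:
--     n = len(s)
--     m = n - 1 if n % 2 else n - 2
--     return ''.join(s[m - i] if i % 2 == 0 else s[i] for i in range(n))
-- ===== Notes on version B (the rewrite author's own statement) =====
-- stated objective: simpler
-- what changed: B replaces A's parity-partition into two lists, explicit reverse, zip-interleave loop and leftover-tail special case by a single pass that writes each output position directly from a closed-form index (s[m-i] at even i with m the last even index, s[i] at odd i).
import Mathlib
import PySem

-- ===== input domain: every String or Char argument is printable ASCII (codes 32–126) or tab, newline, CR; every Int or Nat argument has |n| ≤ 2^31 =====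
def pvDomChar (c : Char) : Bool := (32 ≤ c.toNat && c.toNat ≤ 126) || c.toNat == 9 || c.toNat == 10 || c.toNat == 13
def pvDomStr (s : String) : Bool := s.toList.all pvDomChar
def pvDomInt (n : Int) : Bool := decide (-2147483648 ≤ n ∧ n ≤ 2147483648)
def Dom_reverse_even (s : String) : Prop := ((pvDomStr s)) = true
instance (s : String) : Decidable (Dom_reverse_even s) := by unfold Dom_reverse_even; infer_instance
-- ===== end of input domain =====

-- B computes each output character directly from a closed-form index map (one pass),
-- replacing A's partition/reverse/interleave/tail pipeline; same O(n) cost ("alternative/simpler").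


-- ===== PORT A =====
-- literal port of A: partition by index parity, reverse the evens, interleave, append the leftover.
-- s[i] is always in range here, so the total pyGetD form is exact.
def reverse_even (s : String) : String :=
  let l := s.toList
  if l.length < 2 then s
  else
    let p := (PySem.List.pyRange 0 (l.length : Int) 1).foldl
      (fun (p : List Char × List Char) i =>
        if PySem.Int.mod i 2 == 0 then (p.1 ++ [PySem.List.pyGetD l i ' '], p.2)
        else (p.1, p.2 ++ [PySem.List.pyGetD l i ' ']))
      ([], [])
    let evens := p.1.reverse
    let odds := p.2
    let result := (evens.zip odds).foldl (fun r eo => r ++ [eo.1, eo.2]) ([] : List Char)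
    let result :=
      if evens.length > odds.length then result ++ [PySem.List.pyGetD evens (-1) ' ']
      else if odds.length > evens.length then result ++ [PySem.List.pyGetD odds (-1) ' ']
      else result
    String.ofList result

-- ===== PORT B =====
-- literal port of B: m is the last even index; output[i] = s[m-i] at even i, s[i] at odd i.
def reverse_even_alt (s : String) : String :=
  let l := s.toList
  let n : Int := l.length
  let m : Int := if PySem.Int.mod n 2 != 0 then n - 1 else n - 2
  String.ofList ((PySem.List.pyRange 0 n 1).map (fun i =>
    if PySem.Int.mod i 2 == 0 then PySem.List.pyGetD l (m - i) ' '
    else PySem.List.pyGetD l i ' '))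

-- ===== PRECONDITION & SPEC =====
def Spec_reverse_even (s : String) (out : String) : Prop := out = reverse_even_alt s
instance (s : String) (out : String) : Decidable (Spec_reverse_even s out) := by unfold Spec_reverse_even; infer_instance

-- ===== CLAIM (what is proved, stated in full; the proofs are below) =====
def Claim_equal_reverse_even : Prop := ∀ (s : String), Dom_reverse_even s → Spec_reverse_even s (reverse_even s)

-- ===== LEMMAS AND PROOFS =====

theorem pvFoldChar (l : List Char) (k : Nat) :
    (PySem.List.pyRange 0 (k : Int) 1).foldl
      (fun (p : List Char × List Char) i =>
        if PySem.Int.mod i 2 == 0 then (p.1 ++ [PySem.List.pyGetD l i ' '], p.2)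
        else (p.1, p.2 ++ [PySem.List.pyGetD l i ' ']))
      ([], [])
    = ((List.range ((k+1)/2)).map (fun j => l.getD (2*j) ' '),
       (List.range (k/2)).map (fun j => l.getD (2*j+1) ' ')) := by
  induction k with
  | zero => simp [PySem.List.pyRange_one_eq_nil]
  | succ k ih =>
      have hcast : ((k+1 : Nat) : Int) = (k : Int) + 1 := by push_cast; ring
      rw [hcast, PySem.List.pyRange_one_succ_right (by positivity), List.foldl_append, ih]
      simp only [List.foldl_cons, List.foldl_nil]
      have hm := PySem.Int.mod_natCast k 2
      rcases Nat.even_or_odd k with he | ho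
      · have h2 : k % 2 = 0 := Nat.even_iff.mp he
        have h1 : (k+1+1)/2 = (k+1)/2 + 1 := by omega
        have h0 : (k+1)/2 = k/2 := by omega
        simp only [hm, h2, Nat.cast_zero, beq_self_eq_true, if_true, h1, h0,
          List.range_succ, List.map_append, List.map_cons, List.map_nil]
        have : 2 * (k/2) = k := by omega
        simp [this, PySem.List.pyGetD_natCast]
        omega
      · have h2 : k % 2 = 1 := Nat.odd_iff.mp ho
        have h1 : (k+1+1)/2 = (k+1)/2 := by omega
        have h0 : (k+1)/2 = k/2 + 1 := by omega
        simp only [hm, h2, h0, h1]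
        have hne : ¬ (((1:Nat):Int) == 0) = true := by decide
        simp only [hne, if_false, List.range_succ, List.map_append, List.map_cons, List.map_nil]
        have : 2 * (k/2) + 1 = k := by omega
        simp [this, PySem.List.pyGetD_natCast]
        omega


theorem pvRevMapRange {α : Type} (f : Nat → α) (h : Nat) :
    ((List.range h).map f).reverse = (List.range h).map (fun j => f (h - 1 - j)) := by
  apply List.ext_getElem
  · simp
  · intro i h1 h2
    simp only [List.getElem_reverse, List.getElem_map, List.getElem_range,
      List.length_map, List.length_range] at h1 h2 ⊢


theorem pvZipMapRange {α β : Type} (f : Nat → α) (g : Nat → β) (a b : Nat) :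
    ((List.range a).map f).zip ((List.range b).map g)
      = (List.range (min a b)).map (fun j => (f j, g j)) := by
  apply List.ext_getElem
  · simp
  · intro i h1 h2
    simp [List.getElem_zip]


theorem pvFlatMapPairs {α : Type} (f g : Nat → α) (k : Nat) :
    (List.range k).flatMap (fun j => [f j, g j])
      = (List.range (2*k)).map (fun i => if i % 2 = 0 then f (i/2) else g (i/2)) := by
  induction k with
  | zero => simp
  | succ k ih =>
      have h2 : 2*(k+1) = (2*k + 1) + 1 := by ring
      rw [List.range_succ, List.flatMap_append, ih, h2, List.range_succ, List.map_append,
        List.range_succ, List.map_append]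
      have e1 : (2*k) % 2 = 0 := by omega
      have e2 : (2*k) / 2 = k := by omega
      have e3 : (2*k+1) % 2 = 1 := by omega
      have e4 : (2*k+1) / 2 = k := by omega
      simp [e1, e2, e3, e4]


theorem pvCharA (l : List Char) (hlen : 2 ≤ l.length) :
    reverse_even (String.ofList l)
      = String.ofList ((List.range (2*(l.length/2))).map
          (fun i => if i % 2 = 0 then l.getD (2*((l.length+1)/2 - 1 - i/2)) ' '
                    else l.getD (2*(i/2)+1) ' ')
        ++ (if l.length % 2 = 1 then [l.getD 0 ' '] else [])) := by
  unfold reverse_even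
  simp only [String.toList_ofList]
  rw [if_neg (by omega), pvFoldChar]
  simp only
  rw [pvRevMapRange, pvZipMapRange, PySem.List.foldl_append_eq_flatMap, List.flatMap_map]
  have hmin : min ((l.length+1)/2) (l.length/2) = l.length/2 := by omega
  rw [hmin]
  simp only [Function.comp_def]
  rw [pvFlatMapPairs]
  simp only [List.length_map, List.length_range, List.nil_append]
  rcases Nat.even_or_odd l.length with he | ho
  · have he' : l.length % 2 = 0 := Nat.even_iff.mp he
    rw [if_neg (by omega), if_neg (by omega), if_neg (by omega)]
    simp
  · have ho' : l.length % 2 = 1 := Nat.odd_iff.mp ho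
    rw [if_pos (by omega), if_pos (by omega)]
    have hne : (List.map (fun j => l.getD (2 * ((l.length + 1) / 2 - 1 - j)) ' ')
        (List.range ((l.length + 1) / 2))) ≠ [] := by simp; rintro rfl; simp at hlen
    rw [PySem.List.pyGetD_neg_one _ _ hne, List.getLast_eq_getElem]
    simp only [List.length_map, List.length_range, List.getElem_map, List.getElem_range]
    have h0 : 2 * ((l.length + 1) / 2 - 1 - ((l.length + 1) / 2 - 1)) = 0 := by omega
    rw [h0]



theorem pvCharB (l : List Char) (hlen : 2 ≤ l.length) :
    reverse_even_alt (String.ofList l)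
      = String.ofList ((List.range l.length).map
          (fun i => if i % 2 = 0
            then l.getD ((if l.length % 2 = 1 then l.length - 1 else l.length - 2) - i) ' '
            else l.getD i ' ')) := by
  unfold reverse_even_alt
  simp only [String.toList_ofList]
  rw [PySem.List.pyRange_one]
  simp only [Int.sub_zero, Int.toNat_natCast, List.map_map]
  congr 1
  apply List.map_congr_left
  intro i hi
  simp only [List.mem_range] at hi
  simp only [Function.comp_apply, zero_add]
  have hmi : PySem.Int.mod (i:Int) 2 = ((i % 2 : Nat) : Int) := by
    simpa using PySem.Int.mod_natCast i 2
  have hmn : PySem.Int.mod (l.length:Int) 2 = ((l.length % 2 : Nat) : Int) := by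
    simpa using PySem.Int.mod_natCast l.length 2
  rw [hmi, hmn]
  by_cases hpar : i % 2 = 0
  · by_cases hn2 : l.length % 2 = 1
    · simp [hpar, hn2,
        show ((l.length:Int) - 1 - (i:Int)) = ((l.length - 1 - i : Nat) : Int) by push_cast; omega,
        PySem.List.pyGetD_natCast, List.getD]
    · have hn0 : l.length % 2 = 0 := by omega
      simp [hpar, hn0, hn2,
        show ((l.length:Int) - 2 - (i:Int)) = ((l.length - 2 - i : Nat) : Int) by push_cast; omega,
        PySem.List.pyGetD_natCast, List.getD]
  · have h1 : i % 2 = 1 := by omega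
    simp [h1, hpar, PySem.List.pyGetD_natCast, List.getD]


theorem pvCombine (l : List Char) (hlen : 2 ≤ l.length) :
    (List.range (2*(l.length/2))).map
        (fun i => if i % 2 = 0 then l.getD (2*((l.length+1)/2 - 1 - i/2)) ' '
                  else l.getD (2*(i/2)+1) ' ')
      ++ (if l.length % 2 = 1 then [l.getD 0 ' '] else [])
    = (List.range l.length).map
        (fun i => if i % 2 = 0
          then l.getD ((if l.length % 2 = 1 then l.length - 1 else l.length - 2) - i) ' '
          else l.getD i ' ') := by
  set ψ : Nat → Char := (fun i => if i % 2 = 0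
      then l.getD ((if l.length % 2 = 1 then l.length - 1 else l.length - 2) - i) ' '
      else l.getD i ' ') with hψ
  by_cases hn2 : l.length % 2 = 1
  · have hsplit : l.length = 2*(l.length/2) + 1 := by omega
    rw [if_pos hn2]
    conv_rhs => rw [hsplit]
    rw [List.range_succ, List.map_append, List.map_cons, List.map_nil]
    congr 1
    · apply List.map_congr_left
      intro i hi
      simp only [List.mem_range] at hi
      rw [hψ]
      by_cases hpar : i % 2 = 0
      · simp only [hpar, if_true, reduceIte, hn2]
        congr 1
        omega
      · simp [hpar, show 2*(i/2)+1 = i by omega]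
    · rw [hψ]
      simp only [show (2*(l.length/2)) % 2 = 0 by omega, if_true, reduceIte, hn2]
      congr 2
      omega
  · have hsplit : 2*(l.length/2) = l.length := by omega
    rw [if_neg hn2, List.append_nil, hsplit]
    apply List.map_congr_left
    intro i hi
    simp only [List.mem_range] at hi
    rw [hψ]
    by_cases hpar : i % 2 = 0
    · simp only [hpar, if_true, reduceIte, hn2]
      congr 1
      omega
    · simp [hpar, show 2*(i/2)+1 = i by omega]

theorem pvSmall (l : List Char) (h : l.length < 2) :
    reverse_even (String.ofList l) = reverse_even_alt (String.ofList l) := by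
  match l, h with
  | [], _ => decide
  | [c], _ =>
    unfold reverse_even reverse_even_alt
    simp [String.toList_ofList, PySem.List.pyRange_one, List.range_succ,
      PySem.Int.mod, PySem.List.pyGetD, PySem.List.pyIdx?]

theorem pvMain (l : List Char) (hlen : 2 ≤ l.length) :
    reverse_even (String.ofList l) = reverse_even_alt (String.ofList l) := by
  rw [pvCharA l hlen, pvCharB l hlen]
  exact congrArg String.ofList (pvCombine l hlen)

-- ===== VERDICT (by name: the statement is the Claim_ definition above) =====
theorem reverse_even_spec : Claim_equal_reverse_even := by
  intro s _
  unfold Spec_reverse_even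
  rw [← String.ofList_toList (s := s)]
  by_cases h : s.toList.length < 2
  · exact pvSmall s.toList h
  · exact pvMain s.toList (by omega)
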